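-- pv_equiv track=rewrite | github.com/QuangPhung15/CompetitiveProgramming | codeforce/800/Array Coloring.py | solve
-- ===== SOURCE A (Python) =====
-- def solve(n, a):
-- 	odd, even = 0, 0
--
-- 	for x in a:
-- 		if (x % 2 == 1):
-- 			odd += 1
-- 		else:
-- 			even += 1
--
-- 	if (odd % 2 == 1):
-- 		return "NO"
--
-- 	return "YES"
-- ===== SOURCE B (Python) =====
-- def solve(n, a):
-- 	total = 0
-- 	for x in a:
-- 		total += x
-- 	return "YES" if total % 2 == 0 else "NO"
-- ===== Notes on version B (the rewrite author's own statement) =====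
-- stated objective: simpler
-- what changed: B maintains a single running sum and tests its parity instead of counting odd and even elements and testing the odd-count's parity.
import Mathlib
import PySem

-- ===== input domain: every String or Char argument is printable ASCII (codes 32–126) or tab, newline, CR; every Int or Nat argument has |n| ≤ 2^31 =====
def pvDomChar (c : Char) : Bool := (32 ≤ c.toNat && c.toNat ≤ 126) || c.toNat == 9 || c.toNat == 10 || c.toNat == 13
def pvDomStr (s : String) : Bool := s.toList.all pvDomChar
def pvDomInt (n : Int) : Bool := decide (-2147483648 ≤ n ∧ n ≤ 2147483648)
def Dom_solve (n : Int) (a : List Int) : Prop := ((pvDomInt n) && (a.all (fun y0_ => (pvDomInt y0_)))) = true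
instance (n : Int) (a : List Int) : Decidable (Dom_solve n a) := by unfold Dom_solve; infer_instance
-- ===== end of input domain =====

-- B replaces A's two parity counters by one running sum and tests its parity (objective: simpler).

-- ===== PORT A =====
-- for x in a: if x % 2 == 1: odd += 1 else: even += 1
def solveLoop (a : List Int) (odd even : Int) : Int × Int :=
  match a with
  | [] => (odd, even)
  | x :: rest =>
    if PySem.Int.mod x 2 = 1 then solveLoop rest (odd + 1) even
    else solveLoop rest odd (even + 1)

def solve (n : Int) (a : List Int) : String :=
  let oe := solveLoop a 0 0
  if PySem.Int.mod oe.1 2 = 1 then "NO" else "YES"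

-- ===== PORT B =====
def solve_alt (n : Int) (a : List Int) : String :=
  let total := a.foldl (fun t x => t + x) 0
  if PySem.Int.mod total 2 = 0 then "YES" else "NO"

-- ===== PRECONDITION & SPEC =====
def Spec_solve (n : Int) (a : List Int) (out : String) : Prop := out = solve_alt n a
instance (n : Int) (a : List Int) (out : String) : Decidable (Spec_solve n a out) := by unfold Spec_solve; infer_instance

-- ===== CLAIM (what is proved, stated in full; the proofs are below) =====
def Claim_equal_solve : Prop := ∀ (n : Int) (a : List Int), Dom_solve n a → Spec_solve n a (solve n a)

-- ===== LEMMAS AND PROOFS =====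

-- the odd counter after the loop is congruent mod 2 to odd plus the sum of the list
theorem solveLoop_parity (a : List Int) : ∀ (odd even t : Int),
    (solveLoop a odd even).1 % 2 = (odd + (a.foldl (fun t x => t + x) t) - t) % 2 := by
  induction a with
  | nil => intro odd even t; simp [solveLoop]
  | cons x rest ih =>
    intro odd even t
    simp only [solveLoop, List.foldl]
    rw [PySem.Int.mod_eq_emod_of_pos (by norm_num : (0:Int) < 2)]
    split_ifs with h
    · rw [ih (odd + 1) even (t + x)]
      omega
    · have hx : x % 2 = 0 := by omega
      rw [ih odd (even + 1) (t + x)]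
      omega

-- ===== VERDICT (by name: the statement is the Claim_ definition above) =====
theorem solve_spec : Claim_equal_solve := by
  intro n a _
  unfold Spec_solve solve solve_alt
  have h := solveLoop_parity a 0 0 0
  simp only at h
  simp only [PySem.Int.mod_eq_emod_of_pos (by norm_num : (0:Int) < 2)]
  split_ifs with h1 h2 <;> first | rfl | omega
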